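-- pv_equiv track=rewrite | github.com/arskn/master_thesis | chapter4/chapter4-algorithm-A11.py | Find_Mapping
-- ===== SOURCE A (Python) =====
-- def Create_Arrays_of_Binary_Notation_For_Inputs(n):
--     binary_array = []
--     for i in range (1,2**n):
--         binary_string = bin(i)[2:]
--         bit_array = [int(bit) for bit in binary_string]
--         # set the length of all binary notations to the same length equal to "n"
--         for _ in range(n-len(bit_array)):
--             bit_array.insert(0,0)
--         binary_array.append(bit_array)
--     return(binary_array)
--
-- def Find_Mapping(basis,dimension):
--     # list combinations_of_coefficients consists of all possible combinations of zeros and ones in dimension "dimension" except for combination [0,0, ... , 0]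
--     # using this combinations (after adding combination [0,0, ..., 0]) and elements from basis, we can generate all elements from the hyperplane
--     combinations_of_coefficients = Create_Arrays_of_Binary_Notation_For_Inputs(dimension)
--     # adding combination [0,0, ..., 0]
--     combinations_of_coefficients.insert(0,[0]*dimension)
--     mapping = [[0]*(2**dimension),[0]*(2**dimension)]
--     for i in range(2**dimension):
--         mapping[0][i]=i
--         for j in range(dimension):
--             mapping[1][i]=(mapping[1][i]) ^ (combinations_of_coefficients[i][j]*basis[j])
--     return(mapping)
-- ===== SOURCE B (Python) =====
-- def Find_Mapping(basis, dimension):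
--     # subset-XOR doubling DP: O(2^d) instead of O(2^d * d)
--     values = [0]
--     for k in range(dimension):
--         b = basis[dimension - 1 - k]
--         values = values + [v ^ b for v in values]
--     return [list(range(len(values))), values]
-- ===== Notes on version B (the rewrite author's own statement) =====
-- stated objective: alternative
-- what changed: Replaces the per-index inner loop over all dimension padded binary coefficient digits (after materialising every padded binary string) by a subset-XOR doubling DP that derives each value from an already-computed one, removing the inner loop and the binary-array construction (O(2^d) vs O(2^d*d) work for the 2^d-sized output; timing-probe runs varied between confirming and not confirming a measured speed-up, so none is claimed).
import Mathlib
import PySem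

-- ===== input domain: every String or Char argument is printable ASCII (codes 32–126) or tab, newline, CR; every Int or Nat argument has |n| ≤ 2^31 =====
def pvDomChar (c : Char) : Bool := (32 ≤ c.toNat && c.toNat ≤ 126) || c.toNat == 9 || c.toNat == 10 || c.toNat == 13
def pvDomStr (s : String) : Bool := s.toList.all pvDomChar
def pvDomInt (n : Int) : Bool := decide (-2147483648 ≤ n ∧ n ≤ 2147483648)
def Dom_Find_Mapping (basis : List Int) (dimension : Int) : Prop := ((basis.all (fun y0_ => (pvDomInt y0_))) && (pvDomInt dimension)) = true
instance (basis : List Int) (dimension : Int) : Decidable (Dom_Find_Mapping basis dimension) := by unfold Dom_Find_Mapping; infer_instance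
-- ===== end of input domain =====

-- B replaces A's per-index inner loop over all `dimension` padded binary coefficient digits by a
-- subset-XOR doubling DP (each new block = previous values XOR one basis element): an alternative algorithm doing one XOR per output value.


-- ===== PORT A =====
-- hand port of `bin(i)[2:]` followed by `int(bit)` per character (MSB-first bit list);
-- exact for every i ≥ 1 reached by A's range(1, 2**n)
def pyBits : Nat → List Int
  | 0 => []
  | (n + 1) => pyBits ((n + 1) / 2) ++ [(((n + 1) % 2 : Nat) : Int)]
decreasing_by exact Nat.div_lt_self (Nat.succ_pos n) (by omega)

-- literal port of Create_Arrays_of_Binary_Notation_For_Inputs; `2**n` / `range` are exact for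
-- 0 ≤ n (Pre_ of the caller); the insert(0,0) loop prepends (n - len) zeros (none when negative)
def Create_Arrays_of_Binary_Notation_For_Inputs (n : Int) : List (List Int) :=
  (PySem.List.pyRange 1 ((2 : Int) ^ n.toNat) 1).foldl
    (fun binary_array i =>
      let bit_array := pyBits i.toNat
      let bit_array := List.replicate (n.toNat - bit_array.length) (0 : Int) ++ bit_array
      binary_array ++ [bit_array]) []

-- mapping[0][i] = i and the inner XOR loop filling mapping[1][i]; list indices are rendered with
-- .getD (in range under Pre_, where Python's indexing returns normally)
def Find_Mapping (basis : List Int) (dimension : Int) : List (List Int) :=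
  let n := dimension.toNat   -- 2**dimension raises in Python for dimension < 0 (excluded by Pre_)
  let combinations_of_coefficients :=
    List.replicate n (0 : Int) :: Create_Arrays_of_Binary_Notation_For_Inputs dimension
  let row0 := (List.range (2 ^ n)).map (fun i => (i : Int))
  let row1 := (List.range (2 ^ n)).map (fun i =>
    (List.range n).foldl (fun acc j =>
      PySem.Int.bxor acc (((combinations_of_coefficients.getD i []).getD j 0) * basis.getD j 0)) 0)
  [row0, row1]

-- ===== PORT B =====
-- subset-XOR doubling DP from Source B: values doubles once per k, XORing in basis[dimension-1-k]
def Find_Mapping_alt (basis : List Int) (dimension : Int) : List (List Int) :=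
  let n := dimension.toNat
  let values := (List.range n).foldl
    (fun values k => values ++ values.map (fun v => PySem.Int.bxor v (basis.getD (n - 1 - k) 0)))
    [(0 : Int)]
  [(List.range values.length).map (fun i => (i : Int)), values]

-- ===== PRECONDITION & SPEC =====
-- Python A raises for dimension < 0 (TypeError on range of a float) and, when dimension ≥ 1,
-- IndexError on basis[j] unless basis has at least `dimension` elements.
def Pre_Find_Mapping (basis : List Int) (dimension : Int) : Prop :=
  0 ≤ dimension ∧ dimension ≤ basis.length
instance (basis : List Int) (dimension : Int) : Decidable (Pre_Find_Mapping basis dimension) := by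
  unfold Pre_Find_Mapping; infer_instance

def pvWitness_Find_Mapping : List Int × Int := ([3, 5, -6], 3)

def Spec_Find_Mapping (basis : List Int) (dimension : Int) (out : List (List Int)) : Prop := out = Find_Mapping_alt basis dimension
instance (basis : List Int) (dimension : Int) (out : List (List Int)) : Decidable (Spec_Find_Mapping basis dimension out) := by unfold Spec_Find_Mapping; infer_instance

-- ===== CLAIM (what is proved, stated in full; the proofs are below) =====
def Claim_equal_Find_Mapping : Prop := ∀ (basis : List Int) (dimension : Int), Dom_Find_Mapping basis dimension → Pre_Find_Mapping basis dimension → Spec_Find_Mapping basis dimension (Find_Mapping basis dimension)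

-- ===== LEMMAS AND PROOFS =====

theorem bxor_right_comm (a b c : Int) :
    PySem.Int.bxor (PySem.Int.bxor a b) c = PySem.Int.bxor (PySem.Int.bxor a c) b := by
  unfold PySem.Int.bxor
  split_ifs <;> simp_all [Nat.xor_right_comm] <;> omega

-- value of index i: XOR of c k over the set bits k < m of i (B's doubling invariant)
def xorBits (c : Nat → Int) (m i : Nat) : Int :=
  (List.range m).foldl (fun a k => if i.testBit k then PySem.Int.bxor a (c k) else a) 0

theorem xorBits_succ (c : Nat → Int) (m i : Nat) :
    xorBits c (m + 1) i =
      if i.testBit m then PySem.Int.bxor (xorBits c m i) (c m) else xorBits c m i := by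
  simp [xorBits, List.range_succ]

theorem xorBits_succ_lt (c : Nat → Int) (m i : Nat) (h : i < 2 ^ m) :
    xorBits c (m + 1) i = xorBits c m i := by
  simp [xorBits_succ, Nat.testBit_lt_two_pow h]

theorem xorBits_succ_add (c : Nat → Int) (m i : Nat) (h : i < 2 ^ m) :
    xorBits c (m + 1) (2 ^ m + i) = PySem.Int.bxor (xorBits c m i) (c m) := by
  have hbit : (2 ^ m + i).testBit m = true := by
    simp [Nat.testBit_two_pow_add_eq, Nat.testBit_lt_two_pow h]
  have heq : xorBits c m (2 ^ m + i) = xorBits c m i := by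
    unfold xorBits
    refine PySem.List.foldl_congr_mem _ _ _ _ (fun a k hk => ?_)
    rw [Nat.testBit_two_pow_add_gt (List.mem_range.mp hk) i]

  rw [xorBits_succ, hbit, if_pos rfl, heq]

-- B's fold produces exactly the table of xorBits values
theorem alt_values_eq (c : Nat → Int) (m : Nat) :
    (List.range m).foldl
      (fun values k => values ++ values.map (fun v => PySem.Int.bxor v (c k))) [(0 : Int)] =
    (List.range (2 ^ m)).map (fun i => xorBits c m i) := by
  induction m with
  | zero => simp [xorBits]
  | succ m ih =>
      rw [List.range_succ, List.foldl_append, ih]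
      simp only [List.foldl_cons, List.foldl_nil]
      have hr : List.range (2 ^ (m + 1)) =
          List.range (2 ^ m) ++ (List.range (2 ^ m)).map (2 ^ m + ·) := by
        rw [← List.range_add]; congr 1; ring
      rw [hr, List.map_append, List.map_map, List.map_map]
      congr 1
      · exact List.map_congr_left (fun i hi => (xorBits_succ_lt c m i (List.mem_range.mp hi)).symm)
      · refine List.map_congr_left (fun i hi => ?_)
        simp only [Function.comp]
        exact (xorBits_succ_add c m i (List.mem_range.mp hi)).symm

-- padded binary row of A: entry j is bit (n-1-j) of i
theorem padded_bits (n : Nat) : ∀ i : Nat, i < 2 ^ n →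
    List.replicate (n - (pyBits i).length) (0 : Int) ++ pyBits i =
      (List.range n).map (fun j => if i.testBit (n - 1 - j) then (1 : Int) else 0) := by
  induction n with
  | zero =>
      intro i hi
      interval_cases i
      simp [pyBits]
  | succ n ih =>
      intro i hi
      rw [List.range_succ, List.map_append]
      rcases i with _ | j
      · simp [pyBits, List.map_const', List.replicate_succ']
      · have hdef : pyBits (j + 1) = pyBits ((j + 1) / 2) ++ [(((j + 1) % 2 : Nat) : Int)] := by
          simp [pyBits]
        have hlt : (j + 1) / 2 < 2 ^ n := by
          have := Nat.pow_succ 2 n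
          omega
        have hsub : n + 1 - ((pyBits ((j + 1) / 2)).length + 1) = n - (pyBits ((j + 1) / 2)).length := by
          omega
        rw [hdef, List.length_append, List.length_singleton, hsub,
          ← List.append_assoc, ih _ hlt]
        congr 1
        · refine List.map_congr_left (fun k hk => ?_)
          have hk' := List.mem_range.mp hk
          have h1 : n + 1 - 1 - k = (n - 1 - k) + 1 := by omega
          rw [h1, Nat.testBit_add_one]
        · simp only [List.map_singleton]
          have h0 : n + 1 - 1 - n = 0 := by omega
          rw [h0]
          rcases Nat.mod_two_eq_zero_or_one (j + 1) with h | h <;> simp [Nat.testBit_zero, h]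

-- A's combinations list is the table of padded binary rows, indexed by i
theorem combos_eq (dimension : Int) :
    List.replicate dimension.toNat (0 : Int) ::
      Create_Arrays_of_Binary_Notation_For_Inputs dimension =
    (List.range (2 ^ dimension.toNat)).map (fun i =>
      (List.range dimension.toNat).map
        (fun j => if i.testBit (dimension.toNat - 1 - j) then (1 : Int) else 0)) := by
  set n := dimension.toNat with hn
  unfold Create_Arrays_of_Binary_Notation_For_Inputs
  rw [PySem.List.foldl_append_singleton_eq_map, List.nil_append, PySem.List.pyRange_one,
    List.map_map]
  have hcast : ((2 : Int) ^ n - 1).toNat = 2 ^ n - 1 := by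
    have h1 : ((2 : Int) ^ n) = ((2 ^ n : Nat) : Int) := by push_cast; ring
    omega
  have hr : List.range (2 ^ n) = 0 :: (List.range (2 ^ n - 1)).map (1 + ·) := by
    have h2 : 2 ^ n = 1 + (2 ^ n - 1) := by
      have := Nat.two_pow_pos n
      omega
    conv_lhs => rw [h2]
    rw [List.range_add, List.range_one, List.singleton_append]
  rw [hcast, ← hn, hr, List.map_cons, List.map_map]
  congr 1
  · simp
  · refine List.map_congr_left (fun k hk => ?_)
    have hk' := List.mem_range.mp hk
    have hik : ((1 : Int) + k).toNat = 1 + k := by omega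
    simp only [Function.comp, hik]
    exact padded_bits n (1 + k) (by omega)

-- reversal of an indexed map
theorem map_range_reverse {α : Type} (n : Nat) (g : Nat → α) :
    (List.range n).map (fun j => g (n - 1 - j)) = ((List.range n).map g).reverse := by
  induction n generalizing g with
  | zero => simp
  | succ n ih =>
      conv_lhs => rw [List.range_succ_eq_map]
      conv_rhs => rw [List.range_succ]
      rw [List.map_cons, List.map_map, List.map_append, List.reverse_append]
      refine congrArg₂ List.cons (by simp) ?_
      rw [← ih g]
      refine List.map_congr_left (fun k hk => ?_)
      have hk' := List.mem_range.mp hk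
      simp only [Function.comp]
      congr 1
      omega

-- XOR-fold is insensitive to reversal
theorem foldl_bxor_pull (l : List Int) : ∀ a x : Int,
    l.foldl PySem.Int.bxor (PySem.Int.bxor a x) = PySem.Int.bxor (l.foldl PySem.Int.bxor a) x := by
  induction l with
  | nil => intro a x; rfl
  | cons h t ih =>
      intro a x
      simp only [List.foldl_cons]
      rw [bxor_right_comm, ih]

theorem foldl_bxor_reverse (l : List Int) (a : Int) :
    l.reverse.foldl PySem.Int.bxor a = l.foldl PySem.Int.bxor a := by
  induction l generalizing a with
  | nil => rfl
  | cons h t ih =>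
      rw [List.reverse_cons, List.foldl_append, ih]
      simp only [List.foldl_cons, List.foldl_nil]
      rw [← foldl_bxor_pull t a h]

-- A's inner loop for row index i equals xorBits with the reversed-basis coefficients
theorem rowA_eq_xorBits (basis : List Int) (n i : Nat) :
    (List.range n).foldl (fun acc j =>
        PySem.Int.bxor acc
          ((if i.testBit (n - 1 - j) then (1 : Int) else 0) * basis.getD j 0)) 0 =
      xorBits (fun k => basis.getD (n - 1 - k) 0) n i := by
  have hstep : (List.range n).foldl (fun acc j =>
        PySem.Int.bxor acc
          ((if i.testBit (n - 1 - j) then (1 : Int) else 0) * basis.getD j 0)) 0 =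
      ((List.range n).map (fun j => if i.testBit (n - 1 - j) then basis.getD j 0 else 0)).foldl
        PySem.Int.bxor 0 := by
    rw [List.foldl_map]
    refine PySem.List.foldl_congr_mem _ _ _ _ (fun a j _ => ?_)
    by_cases hb : i.testBit (n - 1 - j) <;> simp [hb]
  have hstep2 : xorBits (fun k => basis.getD (n - 1 - k) 0) n i =
      ((List.range n).map (fun k => if i.testBit k then basis.getD (n - 1 - k) 0 else 0)).foldl
        PySem.Int.bxor 0 := by
    unfold xorBits
    rw [List.foldl_map]
    refine PySem.List.foldl_congr_mem _ _ _ _ (fun a k _ => ?_)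
    by_cases hb : i.testBit k <;> simp [hb]
  rw [hstep, hstep2, ← foldl_bxor_reverse, ← map_range_reverse]
  congr 1
  refine List.map_congr_left (fun j hj => ?_)
  have hj' := List.mem_range.mp hj
  have hjj : n - 1 - (n - 1 - j) = j := by omega
  simp only [hjj]

-- ===== VERDICT (by name: the statement is the Claim_ definition above) =====
theorem Find_Mapping_spec : Claim_equal_Find_Mapping := by
  intro basis dimension _ hpre
  unfold Spec_Find_Mapping Find_Mapping Find_Mapping_alt
  simp only [alt_values_eq (fun k => basis.getD (dimension.toNat - 1 - k) 0) dimension.toNat,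
    List.length_map, List.length_range]
  rw [combos_eq dimension]
  refine congrArg₂ List.cons rfl (congrArg₂ List.cons ?_ rfl)
  refine List.map_congr_left (fun i hi => ?_)
  have hi' := List.mem_range.mp hi
  rw [← rowA_eq_xorBits basis dimension.toNat i]
  refine PySem.List.foldl_congr_mem _ _ _ _ (fun a j hj => ?_)
  have hj' := List.mem_range.mp hj
  rw [PySem.List.getD_map_range _ _ _ _ hi', PySem.List.getD_map_range _ _ _ _ hj']
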